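-- pv_equiv track=rewrite | github.com/NahinM/CSE331 | Checkers/python/Question1/test.py | genaralSolve
-- ===== SOURCE A (Python) =====
-- def genaralSolve(L:str):
--     zero = 0
--     for c in L:
--         if c=='0':
--             zero+=1
--         else: zero=0
--         if zero>=3: return False
--     return True
-- ===== SOURCE B (Python) =====
-- def genaralSolve(L: str):
--     return '000' not in L
-- ===== Notes on version B (the rewrite author's own statement) =====
-- stated objective: idiomatic
-- what changed: Replaced the per-character counting loop with a single substring test, delegating the three-consecutive-zeros decision to the built-in substring search.
import Mathlib
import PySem

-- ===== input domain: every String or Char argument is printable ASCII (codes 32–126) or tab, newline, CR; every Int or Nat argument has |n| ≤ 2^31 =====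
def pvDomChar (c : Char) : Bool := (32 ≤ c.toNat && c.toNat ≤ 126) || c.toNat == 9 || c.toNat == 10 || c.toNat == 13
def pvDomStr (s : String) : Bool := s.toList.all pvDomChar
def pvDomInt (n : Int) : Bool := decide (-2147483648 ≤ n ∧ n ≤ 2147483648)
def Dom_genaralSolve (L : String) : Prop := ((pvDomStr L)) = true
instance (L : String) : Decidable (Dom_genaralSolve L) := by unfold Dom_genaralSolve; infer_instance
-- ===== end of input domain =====

-- B replaces A's per-character zero-counter loop with a single substring test ('000' not in L); idiomatic, same cost.
-- ===== PORT A =====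
-- the for-loop with early 'return False': structural recursion over the characters carrying the counter 'zero'
def genaralSolveLoop : List Char → Nat → Bool
  | [], _ => true
  | c :: rest, z =>
    let z' := if c = '0' then z + 1 else 0
    if z' ≥ 3 then false else genaralSolveLoop rest z'

def genaralSolve (L : String) : Bool := genaralSolveLoop L.toList 0

-- ===== PORT B =====
def genaralSolve_alt (L : String) : Bool := !(PySem.Str.isIn "000" L)

-- ===== PRECONDITION & SPEC =====
def Spec_genaralSolve (L : String) (out : Bool) : Prop := out = genaralSolve_alt L
instance (L : String) (out : Bool) : Decidable (Spec_genaralSolve L out) := by unfold Spec_genaralSolve; infer_instance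

-- ===== CLAIM (what is proved, stated in full; the proofs are below) =====
def Claim_equal_genaralSolve : Prop := ∀ (L : String), Dom_genaralSolve L → Spec_genaralSolve L (genaralSolve L)

-- ===== LEMMAS AND PROOFS =====

-- loop invariant: with z (< 3) zeros pending, the loop decides absence of "000" in replicate z '0' ++ cs
theorem genaralSolveLoop_eq (cs : List Char) : ∀ z : Nat, z ≤ 2 →
    genaralSolveLoop cs z = !decide (['0','0','0'] <:+: (List.replicate z '0' ++ cs)) := by
  induction cs with
  | nil =>
    intro z hz
    interval_cases z <;> decide
  | cons c rest ih =>
    intro z hz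
    by_cases hc : c = '0'
    · subst hc
      have hrw : List.replicate z '0' ++ '0' :: rest = List.replicate (z + 1) '0' ++ rest := by
        rw [List.replicate_succ' (n := z)]; simp
      by_cases h2 : z = 2
      · subst h2
        have hinf : ['0','0','0'] <:+: List.replicate 2 '0' ++ '0' :: rest :=
          ⟨[], rest, by simp [List.replicate]⟩
        simp only [genaralSolveLoop, reduceIte]
        rw [if_pos (by omega : 2 + 1 ≥ 3)]
        simp
        exact hinf
      · have hz1 : z + 1 ≤ 2 := by omega
        simp only [genaralSolveLoop, reduceIte]
        rw [if_neg (by omega : ¬ z + 1 ≥ 3), ih (z + 1) hz1, hrw]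
    · have hstep : genaralSolveLoop (c :: rest) z = genaralSolveLoop rest 0 := by
        simp [genaralSolveLoop, hc]
      rw [hstep, ih 0 (by norm_num)]
      congr 1
      simp only [List.replicate_zero, List.nil_append]
      congr 1
      apply propext
      constructor
      · intro h
        exact h.trans (((List.suffix_cons c rest).trans (List.suffix_append _ _)).isInfix)
      · intro h
        -- an occurrence of "000" in replicate z '0' ++ c :: rest (z ≤ 2, c ≠ '0') lies inside rest
        interval_cases z <;>
          simp_all [List.infix_cons_iff, List.cons_prefix_cons, List.replicate] <;>
          tauto

-- ===== VERDICT (by name: the statement is the Claim_ definition above) =====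
theorem genaralSolve_spec : Claim_equal_genaralSolve := by
  intro L _
  unfold Spec_genaralSolve genaralSolve genaralSolve_alt
  rw [genaralSolveLoop_eq L.toList 0 (by norm_num)]
  have := PySem.Str.isIn_iff_infix (sub := "000") (s := L)
  cases hb : PySem.Str.isIn "000" L <;> simp_all [List.replicate]
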